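-- pv_equiv track=rewrite | github.com/tanuarta/leet | easy/longest_palindrome.py | longest_palind
-- ===== SOURCE A (Python) =====
-- def longest_palind(s):
--   charDict = {}
--   long_sum = 0
--   middle = 0
--
--   for char in s:
--     if char in charDict:
--       charDict[char] += 1
--     else:
--       charDict[char] = 1
--
--   if len(charDict) == 1:
--     return charDict[s[0]]
--
--   for char in charDict:
--     if charDict[char] % 2 == 0:
--       long_sum += charDict[char]
--     if charDict[char] % 2 == 1:
--       if middle == 0:
--         long_sum += charDict[char]
--         middle = 1
--       else:
--         long_sum += charDict[char] - 1
--
--   return long_sum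
-- ===== SOURCE B (Python) =====
-- def longest_palind(s):
--   t = sorted(s)
--   pairs = 0
--   i = 0
--   while i + 1 < len(t):
--     if t[i] == t[i + 1]:
--       pairs += 1
--       i += 2
--     else:
--       i += 1
--   return 2 * pairs + (1 if 2 * pairs < len(s) else 0)
-- ===== Notes on version B (the rewrite author's own statement) =====
-- stated objective: alternative
-- what changed: Drops the frequency dictionary entirely: B sorts the characters and greedily pairs adjacent equal ones in one scan, returning 2*pairs plus one centre slot when a character is left unpaired.
import Mathlib
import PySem

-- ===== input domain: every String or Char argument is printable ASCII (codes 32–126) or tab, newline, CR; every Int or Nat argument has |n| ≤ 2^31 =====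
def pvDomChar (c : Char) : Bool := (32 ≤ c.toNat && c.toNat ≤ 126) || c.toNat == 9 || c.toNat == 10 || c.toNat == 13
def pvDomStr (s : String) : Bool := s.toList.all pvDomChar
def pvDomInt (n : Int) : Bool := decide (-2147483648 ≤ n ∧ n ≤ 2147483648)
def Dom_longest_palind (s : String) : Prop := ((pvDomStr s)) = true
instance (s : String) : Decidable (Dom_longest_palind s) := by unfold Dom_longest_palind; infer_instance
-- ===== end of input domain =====

-- B drops A's frequency dictionary: it sorts the characters and greedily pairs adjacent equal
-- ones in one scan, adding one centre slot when a character is left unpaired; objective: alternative.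

-- ===== PORT A =====
-- body of A's second loop: st = (long_sum, middle), v = charDict[char]
def pvStepA (st : Int × Int) (v : Int) : Int × Int :=
  let st := if PySem.Int.mod v 2 == 0 then (st.1 + v, st.2) else st
  if PySem.Int.mod v 2 == 1 then
    if st.2 = 0 then (st.1 + v, (1 : Int)) else (st.1 + v - 1, st.2)
  else st

def longest_palind (s : String) : Int :=
  -- for char in s: if char in charDict: charDict[char] += 1 else: charDict[char] = 1
  let charDict := s.toList.foldl (fun d c =>
    match d.get? c with
    | some v => d.insert c (v + 1)
    | none   => d.insert c 1) PySem.Dict.empty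
  if charDict.size = 1 then
    -- return charDict[s[0]]: here the dict has a key, so s is nonempty and s[0] is that key;
    -- the `none`/default arms below are unreachable.
    match PySem.Str.pyGet? s 0 with
    | some c => charDict.getD c 0
    | none   => 0
  else
    -- for char in charDict: …  (char is a key, so charDict[char] always succeeds)
    (charDict.keys.foldl (fun st c => pvStepA st (charDict.getD c 0)) ((0 : Int), (0 : Int))).1

-- ===== PORT B =====
-- the while loop over index i (advancing by 2 after a pair, by 1 otherwise), as the
-- structural recursion consuming the sorted list in the same steps
def pvPairScan : List Char → Int
  | [] => 0
  | [_] => 0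
  | a :: b :: r => if a == b then 1 + pvPairScan r else pvPairScan (b :: r)

def longest_palind_alt (s : String) : Int :=
  let t := PySem.List.sorted s.toList (fun c => c) false
  let pairs := pvPairScan t
  2 * pairs + (if 2 * pairs < PySem.List.len s.toList then 1 else 0)

-- ===== PRECONDITION & SPEC =====
def Spec_longest_palind (s : String) (out : Int) : Prop := out = longest_palind_alt s
instance (s : String) (out : Int) : Decidable (Spec_longest_palind s out) := by unfold Spec_longest_palind; infer_instance

-- ===== CLAIM (what is proved, stated in full; the proofs are below) =====
def Claim_equal_longest_palind : Prop := ∀ (s : String), Dom_longest_palind s → Spec_longest_palind s (longest_palind s)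

-- ===== LEMMAS AND PROOFS =====

-- A's membership-split counting step equals the getD step, so A's build is Counter(s).
lemma build_eq (l : List Char) (d : PySem.Dict Char Int) :
    l.foldl (fun d c =>
      match d.get? c with
      | some v => d.insert c (v + 1)
      | none   => d.insert c 1) d
    = l.foldl (fun d c => d.insert c (d.getD c 0 + 1)) d := by
  induction l generalizing d with
  | nil => rfl
  | cons c t ih =>
      simp only [List.foldl_cons]
      rw [ih]
      congr 1
      cases h : d.get? c with
      | some v => simp [PySem.Dict.getD_eq_get?_getD, h]
      | none   => simp [PySem.Dict.getD_eq_get?_getD, h]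

-- Invariant of A's middle-toggle loop over a list of frequencies.
lemma loopA_eq (vs : List Int) (acc m : Int) :
    (vs.foldl pvStepA (acc, m)).1
    = acc + vs.sum - (vs.countP (fun v => PySem.Int.mod v 2 == 1) : Int)
        + (if m = 0 ∧ vs.countP (fun v => PySem.Int.mod v 2 == 1) ≠ 0 then 1 else 0) := by
  induction vs generalizing acc m with
  | nil => simp
  | cons v t ih =>
      simp only [List.foldl_cons, List.countP_cons, List.sum_cons]
      rcases PySem.Int.mod_two_eq v with h | h
      · have h1 : (PySem.Int.mod v 2 == 0) = true := by rw [h]; rfl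
        have h2 : (PySem.Int.mod v 2 == 1) = false := by rw [h]; rfl
        have hstep : pvStepA (acc, m) v = (acc + v, m) := by
          unfold pvStepA; rw [h1, h2]; simp
        rw [hstep, ih]
        simp only [h2, Bool.false_eq_true, if_false, Nat.add_zero]
        split_ifs <;> omega
      · have h1 : (PySem.Int.mod v 2 == 0) = false := by rw [h]; rfl
        have h2 : (PySem.Int.mod v 2 == 1) = true := by rw [h]; rfl
        by_cases hm : m = 0
        · have hstep : pvStepA (acc, m) v = (acc + v, 1) := by
            unfold pvStepA; rw [h1, h2]; simp [hm]
          rw [hstep, ih]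
          simp only [h2, if_true, hm]
          have hR : True ∧ List.countP (fun v => PySem.Int.mod v 2 == 1) t + 1 ≠ 0 :=
            ⟨trivial, Nat.succ_ne_zero _⟩
          rw [if_pos hR, if_neg (by simp :
            ¬((1:ℤ) = 0 ∧ List.countP (fun v => PySem.Int.mod v 2 == 1) t ≠ 0))]
          push_cast; ring
        · have hstep : pvStepA (acc, m) v = (acc + v - 1, m) := by
            unfold pvStepA; rw [h1, h2]; simp [hm]
          rw [hstep, ih]
          simp only [h2, if_true]
          split_ifs <;> push_cast <;> omega

-- A's keys-fold with lookup is a fold over the values.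
lemma keys_fold_values (d : PySem.Dict Char Int) (hnd : d.keys.Nodup)
    (F : Int × Int → Int → Int × Int) (init : Int × Int) :
    d.keys.foldl (fun st c => F st (d.getD c 0)) init = d.values.foldl F init := by
  rw [PySem.Dict.values_eq_map_keys d hnd 0, List.foldl_map]

-- parity bridge: Python's v % 2 == 1 on a Nat-valued count
lemma mod_bridge (n : Nat) : (PySem.Int.mod (n : Int) 2 == 1) = (n % 2 == 1) := by
  simp [PySem.Int.mod, Int.fmod_eq_emod]; omega

lemma ofList_perm_dedup (l : List Char) : (PySem.Set.ofList l).Perm l.dedup :=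
  (List.perm_ext_iff_of_nodup (PySem.Set.nodup_ofList l) l.nodup_dedup).mpr
    (by intro a; simp [PySem.Set.mem_ofList])

lemma counter_values_eq (l : List Char) :
    (PySem.Dict.counter l).values = (PySem.Set.ofList l).map (fun k => (l.count k : Int)) := by
  simp only [PySem.Dict.values, PySem.Dict.items_counter, List.map_map]; rfl

-- the number of odd-frequency characters of l, counted over a nodup enumeration of l's chars
def oddCnt (l : List Char) : Nat := l.dedup.countP (fun c => l.count c % 2 == 1)

-- greedy adjacent pairing on a sorted list: 2*pairs + #odd-frequency chars = length
lemma pairScan_spec (t : List Char) (h : t.Pairwise (· ≤ ·)) :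
    2 * pvPairScan t + (oddCnt t : Int) = t.length := by
  induction t using pvPairScan.induct with
  | case1 => simp [pvPairScan, oddCnt]
  | case2 a => simp [pvPairScan, oddCnt]
  | case3 a b r hab ih =>
      have hab' : a = b := by simpa using hab
      subst hab'
      have hO : oddCnt (a :: a :: r) = oddCnt r := by
        unfold oddCnt
        have hp : (fun c => (a :: a :: r).count c % 2 == 1)
            = (fun c => r.count c % 2 == 1) := by
          funext c
          simp only [List.count_cons]
          by_cases hc : c = a <;> simp [hc] <;> omega
        rw [hp, List.dedup_cons_of_mem List.mem_cons_self]
        by_cases ha : a ∈ r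
        · rw [List.dedup_cons_of_mem ha]
        · rw [List.dedup_cons_of_notMem ha, List.countP_cons]
          have : r.count a = 0 := List.count_eq_zero_of_not_mem ha
          simp [this]
      rw [pvPairScan, if_pos hab, hO]
      have := ih h.tail.tail
      push_cast [List.length_cons] at this ⊢; omega
  | case4 a b r hab ih =>
      have hab' : a ≠ b := by simpa using hab
      have hle : ∀ x ∈ b :: r, a ≤ x := (List.pairwise_cons.mp h).1
      have hbr : (b :: r).Pairwise (· ≤ ·) := h.tail
      have hnm : a ∉ b :: r := by
        intro hmem
        rcases List.mem_cons.mp hmem with rfl | hmr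
        · exact hab' rfl
        · have hba : b ≤ a := (List.pairwise_cons.mp hbr).1 a hmr
          have hab2 : a ≤ b := hle b List.mem_cons_self
          exact hab' (le_antisymm hab2 hba)
      have hO : oddCnt (a :: b :: r) = 1 + oddCnt (b :: r) := by
        unfold oddCnt
        rw [List.dedup_cons_of_notMem hnm, List.countP_cons]
        have hca : (b :: r).count a = 0 := List.count_eq_zero_of_not_mem hnm
        have hpa : ((a :: b :: r).count a % 2 == 1) = true := by
          simp [hca]
        have hcongr : List.countP (fun c => (a :: b :: r).count c % 2 == 1) (b :: r).dedup
            = List.countP (fun c => (b :: r).count c % 2 == 1) (b :: r).dedup := by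
          apply List.countP_congr
          intro c hc
          have hcne : c ≠ a := fun hca' => hnm (hca' ▸ List.mem_dedup.mp hc)
          simp [List.count_cons, Ne.symm hcne]
        rw [hcongr, hpa]
        simp [Nat.add_comm]
      rw [pvPairScan, if_neg (by simpa using hab'), hO]
      have := ih hbr
      unfold oddCnt at this ⊢
      push_cast [List.length_cons] at this ⊢; omega

-- sum of Counter values = length
lemma counter_values_sum (l : List Char) :
    (PySem.Dict.counter l).values.sum = (l.length : Int) := by
  rw [counter_values_eq, ((ofList_perm_dedup l).map _).sum_eq]
  have : (l.dedup.map fun k => ((l.count k : Nat) : Int)).sum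
      = ((l.dedup.map fun k => l.count k).sum : Int) := by
    rw [Nat.cast_list_sum, List.map_map]; rfl
  rw [this, List.sum_map_count_dedup_eq_length]

-- countP of odd over Counter values = oddCnt
lemma counter_values_countP (l : List Char) :
    (PySem.Dict.counter l).values.countP (fun v => PySem.Int.mod v 2 == 1) = oddCnt l := by
  rw [counter_values_eq, List.countP_map, (ofList_perm_dedup l).countP_eq]
  unfold oddCnt
  congr 1
  funext c
  exact mod_bridge (l.count c)

-- oddCnt is a permutation invariant
lemma oddCnt_perm {t l : List Char} (h : t.Perm l) : oddCnt t = oddCnt l := by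
  unfold oddCnt
  have hc : (fun c => t.count c % 2 == 1) = (fun c => l.count c % 2 == 1) := by
    funext c; rw [h.count_eq]
  rw [hc, h.dedup.countP_eq]

-- A in closed form
lemma A_form (s : String) :
    longest_palind s
      = (s.toList.length : Int) - (oddCnt s.toList : Int)
        + (if oddCnt s.toList = 0 then 0 else 1) := by
  unfold longest_palind
  dsimp only
  rw [build_eq, PySem.Dict.foldl_insert_getD_add_one_eq_counter]
  set l := s.toList with hl
  set d := PySem.Dict.counter l with hd
  have hnd : d.keys.Nodup := PySem.Dict.nodup_keys_counter l
  have hCnt := counter_values_countP l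
  have hSum := counter_values_sum l
  rw [← hd] at hCnt hSum
  by_cases hsz : d.size = 1
  · -- single-distinct-character branch of A
    have hitems : d.items = (PySem.Set.ofList l).map (fun k => (k, (l.count k : Int))) :=
      PySem.Dict.items_counter l
    have hlen : ((PySem.Set.ofList l).map (fun k => (k, (l.count k : Int)))).length = 1 := by
      rw [← hitems]; exact hsz
    rw [List.length_map] at hlen
    obtain ⟨k0, hk0⟩ := List.length_eq_one_iff.mp hlen
    cases hlc : l with
    | nil =>
        exfalso
        rw [hlc] at hk0
        simp [PySem.Set.ofList] at hk0
    | cons c t =>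
        have hc_mem : c ∈ PySem.Set.ofList l := by
          rw [PySem.Set.mem_ofList]; rw [hlc]; exact List.mem_cons_self
        rw [hk0] at hc_mem
        have hck : c = k0 := by simpa using hc_mem
        have hget : PySem.Str.pyGet? s 0 = some c := by
          have hsc : s.toList = c :: t := by rw [← hl, hlc]
          simp [PySem.Str.pyGet?, hsc]
        rw [if_pos hsz, hget]
        have hvals : d.values = [(l.count c : Int)] := by
          show d.items.map (·.2) = _
          rw [hitems, hk0, ← hck]
          simp
        have hgd : d.getD c 0 = (l.count c : Int) := by
          rw [hd]; exact PySem.Dict.getD_counter l c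
        dsimp only
        rw [hgd, ← hlc]
        rw [hvals] at hCnt hSum
        simp only [List.sum_cons, List.sum_nil, List.countP_cons, List.countP_nil] at hCnt hSum
        rw [mod_bridge] at hCnt
        by_cases hpar : (l.count c % 2 == 1) = true
        · rw [hpar] at hCnt
          simp at hCnt
          rw [if_neg (by omega : ¬ oddCnt l = 0)]
          omega
        · simp only [Bool.not_eq_true] at hpar
          rw [hpar] at hCnt
          simp at hCnt
          rw [if_pos (by omega : oddCnt l = 0)]
          omega
  · rw [if_neg hsz]
    rw [keys_fold_values d hnd pvStepA ((0 : Int), (0 : Int)), loopA_eq]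
    rw [hCnt, hSum]
    simp only [true_and, zero_add]
    split_ifs <;> omega

-- ===== VERDICT (by name: the statement is the Claim_ definition above) =====
theorem longest_palind_spec : Claim_equal_longest_palind := by
  intro s _
  unfold Spec_longest_palind longest_palind_alt
  rw [A_form]
  dsimp only
  set t := PySem.List.sorted s.toList (fun c => c) false with ht
  have hperm : t.Perm s.toList := PySem.List.sorted_perm s.toList (fun c => c) false
  have hps := pairScan_spec t (by simpa using PySem.List.sorted_pairwise s.toList (fun c => c))
  rw [oddCnt_perm hperm] at hps
  have hlen : t.length = s.toList.length := hperm.length_eq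
  rw [hlen] at hps
  rw [PySem.List.len_eq]
  by_cases h0 : oddCnt s.toList = 0
  · rw [if_pos h0]
    rw [h0] at hps
    have : ¬ (2 * pvPairScan t < (s.toList.length : Int)) := by omega
    rw [if_neg this]; omega
  · rw [if_neg h0]
    have hpos : 0 < (oddCnt s.toList : Int) := by exact_mod_cast Nat.pos_of_ne_zero h0
    have : 2 * pvPairScan t < (s.toList.length : Int) := by omega
    rw [if_pos this]; omega
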